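-- pv_equiv track=rewrite | github.com/ArcProjet/ARC | primitive.py | growingColor0
-- ===== SOURCE A (Python) =====
-- def gridCopy(grid):
--     res = [[0 for _ in range(len(grid[0]))] for _ in range(len(grid))]
--     for i in range(0, len(grid)):
--         for j in range(0, len(grid[i])):
--             res[i][j] = grid[i][j]
--     return res
--
-- def growingColor0(grid):
--     res = gridCopy(grid)
--     for i in range(1, len(grid)):
--         for j in range(len(grid[0])):
--             if (grid[i][j] == 0):
--                 res[i - 1][j] = 0
--     for k in range(0, len(grid)):
--         for l in range(len(grid[0]) - 2, -1, -1):
--             if (grid[k][l] == 0):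
--                 res[k][l + 1] = 0
--     for m in range(len(grid) - 2, -1, -1):
--         for n in range(len(grid[0])):
--             if (grid[m][n] == 0):
--                 res[m + 1][n] = 0
--     for o in range(len(grid)):
--         for p in range(1, len(grid[0])):
--             if (grid[o][p] == 0):
--                 res[o][p - 1] = 0
--     return res
-- ===== SOURCE B (Python) =====
-- def growingColor0(grid):
--     res = [row[:] for row in grid]
--     h = len(grid)
--     for i, row in enumerate(grid):
--         for j, v in enumerate(row):
--             if v == 0:
--                 if i >= 1:
--                     res[i - 1][j] = 0
--                 if j + 1 < len(row):
--                     res[i][j + 1] = 0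
--                 if i + 1 < h:
--                     res[i + 1][j] = 0
--                 if j >= 1:
--                     res[i][j - 1] = 0
--     return res
-- ===== Notes on version B (the rewrite author's own statement) =====
-- stated objective: simpler
-- what changed: A's four separate directional sweeps over the grid (plus an element-by-element copy) are fused into one nested scan over a sliced copy that, for each zero cell of the original grid, writes 0 into all four in-bounds neighbors; correct because every pass of A reads only the original grid.
import Mathlib
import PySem

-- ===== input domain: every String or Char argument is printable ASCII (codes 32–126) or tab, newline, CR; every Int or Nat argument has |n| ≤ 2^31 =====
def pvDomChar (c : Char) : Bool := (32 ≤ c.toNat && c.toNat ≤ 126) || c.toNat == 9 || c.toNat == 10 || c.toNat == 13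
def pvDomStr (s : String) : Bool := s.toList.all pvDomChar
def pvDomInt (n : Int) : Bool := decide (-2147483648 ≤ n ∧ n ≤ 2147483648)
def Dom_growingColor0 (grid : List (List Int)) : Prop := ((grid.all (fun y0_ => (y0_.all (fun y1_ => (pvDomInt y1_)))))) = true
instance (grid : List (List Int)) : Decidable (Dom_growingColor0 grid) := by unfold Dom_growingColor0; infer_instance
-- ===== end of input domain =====

-- B fuses A's four directional sweeps into one nested scan that zeroes all four in-bounds
-- neighbors of each zero cell of the original grid (objective: simpler; return value only,
-- neither version mutates its argument).

-- ===== PORT A =====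
-- grid[i][j] read (in-bounds under Pre_, where Python's IndexError cannot fire):
def getCell (g : List (List Int)) (i j : Nat) : Int := (g.getD i []).getD j 0
-- res[i][j] = v (in-bounds under Pre_; List.set is a no-op out of range, Python raises there):
def set2 (g : List (List Int)) (i j : Nat) (v : Int) : List (List Int) :=
  g.set i ((g.getD i []).set j v)

def gridCopyPort (grid : List (List Int)) : List (List Int) :=
  let w := (grid.headD []).length
  let res := List.replicate grid.length (List.replicate w (0 : Int))
  (List.range grid.length).foldl (fun res i =>
    (List.range (grid.getD i []).length).foldl (fun res j =>
      set2 res i j (getCell grid i j)) res) res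

def growingColor0 (grid : List (List Int)) : List (List Int) :=
  let h := grid.length
  let w := (grid.headD []).length
  let res := gridCopyPort grid
  let res := (List.range' 1 (h - 1)).foldl (fun res i =>
    (List.range w).foldl (fun res j =>
      if getCell grid i j = 0 then set2 res (i - 1) j 0 else res) res) res
  let res := (List.range h).foldl (fun res k =>
    ((List.range (w - 1)).reverse).foldl (fun res l =>
      if getCell grid k l = 0 then set2 res k (l + 1) 0 else res) res) res
  let res := ((List.range (h - 1)).reverse).foldl (fun res m =>
    (List.range w).foldl (fun res n =>
      if getCell grid m n = 0 then set2 res (m + 1) n 0 else res) res) res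
  (List.range h).foldl (fun res o =>
    (List.range' 1 (w - 1)).foldl (fun res p =>
      if getCell grid o p = 0 then set2 res o (p - 1) 0 else res) res) res

-- ===== PORT B =====
def growingColor0_alt (grid : List (List Int)) : List (List Int) :=
  let h := grid.length
  (List.range h).foldl (fun res i =>
    let row := grid.getD i []
    (List.range row.length).foldl (fun res j =>
      if row.getD j 0 = 0 then
        let res := if 1 ≤ i then set2 res (i - 1) j 0 else res
        let res := if j + 1 < row.length then set2 res i (j + 1) 0 else res
        let res := if i + 1 < h then set2 res (i + 1) j 0 else res
        if 1 ≤ j then set2 res i (j - 1) 0 else res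
      else res) res) grid

-- ===== PRECONDITION & SPEC =====
-- Pre_ excludes exactly the ragged grids: on every non-rectangular grid with ≥ 2 rows the
-- Python A raises IndexError (either in gridCopy or when a pass indexes grid[i][j] with
-- j < len(grid[0])), so A returns precisely on rectangular grids.
def Pre_growingColor0 (grid : List (List Int)) : Prop :=
  ∀ row ∈ grid, row.length = (grid.headD []).length
instance (grid : List (List Int)) : Decidable (Pre_growingColor0 grid) := by
  unfold Pre_growingColor0; infer_instance
def pvWitness_growingColor0 : List (List Int) := [[0, 1], [1, 2]]

def Spec_growingColor0 (grid : List (List Int)) (out : List (List Int)) : Prop := out = growingColor0_alt grid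
instance (grid : List (List Int)) (out : List (List Int)) : Decidable (Spec_growingColor0 grid out) := by unfold Spec_growingColor0; infer_instance

-- ===== CLAIM (what is proved, stated in full; the proofs are below) =====
def Claim_equal_growingColor0 : Prop := ∀ (grid : List (List Int)), Dom_growingColor0 grid → Pre_growingColor0 grid → Spec_growingColor0 grid (growingColor0 grid)

-- ===== LEMMAS AND PROOFS =====

-- A cell position is in bounds of the grid
def InB (grid : List (List Int)) (p : Nat × Nat) : Prop :=
  p.1 < grid.length ∧ p.2 < (grid.getD p.1 []).length

-- g has the same row structure as grid
def Shape (g grid : List (List Int)) : Prop :=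
  g.length = grid.length ∧ ∀ i, (g.getD i []).length = (grid.getD i []).length

-- apply a sequence of writes, the written value a function of the position
def setCellsF (f : Nat → Nat → Int) (g : List (List Int)) (ps : List (Nat × Nat)) : List (List Int) :=
  ps.foldl (fun r p => set2 r p.1 p.2 (f p.1 p.2)) g

def zf : Nat → Nat → Int := fun _ _ => 0

-- write-position lists of the two programs
def PCopy (grid : List (List Int)) : List (Nat × Nat) :=
  (List.range grid.length).flatMap (fun i =>
    (List.range (grid.getD i []).length).flatMap (fun j => [(i, j)]))

def PA (grid : List (List Int)) : List (Nat × Nat) :=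
  let h := grid.length
  let w := (grid.headD []).length
  (List.range' 1 (h - 1)).flatMap (fun i => (List.range w).flatMap (fun j =>
      if getCell grid i j = 0 then [(i - 1, j)] else [])) ++
  (List.range h).flatMap (fun k => ((List.range (w - 1)).reverse).flatMap (fun l =>
      if getCell grid k l = 0 then [(k, l + 1)] else [])) ++
  ((List.range (h - 1)).reverse).flatMap (fun m => (List.range w).flatMap (fun n =>
      if getCell grid m n = 0 then [(m + 1, n)] else [])) ++
  (List.range h).flatMap (fun o => (List.range' 1 (w - 1)).flatMap (fun p =>
      if getCell grid o p = 0 then [(o, p - 1)] else []))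

def PB (grid : List (List Int)) : List (Nat × Nat) :=
  let h := grid.length
  (List.range h).flatMap (fun i =>
    let row := grid.getD i []
    (List.range row.length).flatMap (fun j =>
      if row.getD j 0 = 0 then
        (if 1 ≤ i then [(i - 1, j)] else []) ++
        (if j + 1 < row.length then [(i, j + 1)] else []) ++
        (if i + 1 < h then [(i + 1, j)] else []) ++
        (if 1 ≤ j then [(i, j - 1)] else [])
      else []))

-- the "zero-neighborhood" condition both position lists characterize
def NbrZero (grid : List (List Int)) (a b : Nat) : Prop :=
  (a + 1 < grid.length ∧ b < (grid.headD []).length ∧ getCell grid (a + 1) b = 0) ∨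
  (a < grid.length ∧ 1 ≤ b ∧ b < (grid.headD []).length ∧ getCell grid a (b - 1) = 0) ∨
  (1 ≤ a ∧ a < grid.length ∧ b < (grid.headD []).length ∧ getCell grid (a - 1) b = 0) ∨
  (a < grid.length ∧ b + 1 < (grid.headD []).length ∧ getCell grid a (b + 1) = 0)

lemma getD_set {α : Type} (l : List α) (i : Nat) (x : α) (d : α) (a : Nat) :
    (l.set i x).getD a d = if i = a ∧ i < l.length then x else l.getD a d := by
  simp only [List.getD_eq_getElem?_getD, List.getElem?_set]
  split_ifs <;> simp_all
  omega

lemma getD_in {α : Type} (l : List α) (i : Nat) (h : i < l.length) (d : α) :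
    l.getD i d = l[i] := by
  simp [List.getD_eq_getElem?_getD, List.getElem?_eq_getElem h]

lemma getD_out {α : Type} (l : List α) (i : Nat) (h : l.length ≤ i) (d : α) :
    l.getD i d = d := by
  simp [List.getD_eq_getElem?_getD, List.getElem?_eq_none h]

lemma rowlen_of_pre {grid : List (List Int)} (hp : Pre_growingColor0 grid) {i : Nat}
    (hi : i < grid.length) : (grid.getD i []).length = (grid.headD []).length := by
  rw [getD_in grid i hi]
  exact hp _ (List.getElem_mem hi)

lemma shape_set2 {g grid : List (List Int)} (h : Shape g grid) (i j : Nat) (v : Int) :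
    Shape (set2 g i j v) grid := by
  refine ⟨by simpa [set2] using h.1, fun a => ?_⟩
  rw [set2, getD_set]
  split_ifs with hc
  · rw [List.length_set, ← hc.1]; exact h.2 i
  · exact h.2 a

lemma getCell_set2 {g grid : List (List Int)} (hs : Shape g grid) {i j : Nat}
    (hi : i < grid.length) (hj : j < (grid.getD i []).length) (v : Int) (a b : Nat) :
    getCell (set2 g i j v) a b = if i = a ∧ j = b then v else getCell g a b := by
  have hig : i < g.length := hs.1 ▸ hi
  have hjg : j < (g.getD i []).length := hs.2 i ▸ hj
  unfold getCell set2
  rw [getD_set]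
  by_cases ha : i = a
  · subst ha
    rw [if_pos ⟨rfl, hig⟩, getD_set]
    by_cases hb : j = b
    · subst hb; rw [if_pos ⟨rfl, hjg⟩, if_pos ⟨rfl, rfl⟩]
    · simp [hb]
  · simp [ha]

lemma setCellsF_spec (f : Nat → Nat → Int) {grid g : List (List Int)} (hs : Shape g grid)
    {ps : List (Nat × Nat)} (hin : ∀ p ∈ ps, InB grid p) :
    Shape (setCellsF f g ps) grid ∧
      ∀ a b, getCell (setCellsF f g ps) a b =
        if (a, b) ∈ ps then f a b else getCell g a b := by
  induction ps generalizing g with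
  | nil => exact ⟨hs, fun a b => by simp [setCellsF]⟩
  | cons p ps ih =>
    have hpin := hin p List.mem_cons_self
    have hs' := shape_set2 hs p.1 p.2 (f p.1 p.2)
    have IH := ih hs' (fun q hq => hin q (List.mem_cons_of_mem _ hq))
    refine ⟨IH.1, fun a b => ?_⟩
    have step : setCellsF f g (p :: ps) = setCellsF f (set2 g p.1 p.2 (f p.1 p.2)) ps := rfl
    rw [step, IH.2 a b]
    by_cases hm : (a, b) ∈ ps
    · rw [if_pos hm, if_pos (List.mem_cons_of_mem _ hm)]
    · rw [if_neg hm, getCell_set2 hs hpin.1 hpin.2]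
      by_cases hpe : p.1 = a ∧ p.2 = b
      · obtain ⟨h1, h2⟩ := hpe
        subst h1; subst h2
        rw [if_pos ⟨rfl, rfl⟩, if_pos (by simp [List.mem_cons])]
      · rw [if_neg hpe, if_neg (by
          simp only [List.mem_cons]
          rintro (h | h)
          · exact hpe ⟨congrArg Prod.fst h.symm, congrArg Prod.snd h.symm⟩
          · exact hm h)]

lemma setCellsF_append (f : Nat → Nat → Int) (g : List (List Int)) (ps qs : List (Nat × Nat)) :
    setCellsF f g (ps ++ qs) = setCellsF f (setCellsF f g ps) qs :=
  List.foldl_append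

lemma setCellsF_if (f : Nat → Nat → Int) (r : List (List Int)) (c : Prop) [Decidable c]
    (a b : Nat) : (if c then set2 r a b (f a b) else r) = setCellsF f r (if c then [(a, b)] else []) := by
  split <;> simp [setCellsF]

lemma foldl_setCells {f : Nat → Nat → Int} {body : List (List Int) → Nat → List (List Int)}
    {W : Nat → List (Nat × Nat)} (hb : ∀ r k, body r k = setCellsF f r (W k))
    (L : List Nat) (g : List (List Int)) :
    L.foldl body g = setCellsF f g (L.flatMap W) := by
  induction L generalizing g with
  | nil => simp [setCellsF]
  | cons k L ih => simp [List.foldl_cons, hb, List.flatMap_cons, setCellsF_append, ih]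

lemma mem_ite_nil {α : Type} (c : Prop) [Decidable c] (p : α) (L : List α) :
    (p ∈ if c then L else []) ↔ c ∧ p ∈ L := by
  split <;> simp_all

lemma mem_ite_singleton {α : Type} (c : Prop) [Decidable c] (p q : α) :
    (p ∈ if c then [q] else []) ↔ c ∧ p = q := by
  split <;> simp_all

lemma setCellsF_single (f : Nat → Nat → Int) (r : List (List Int)) (a b : Nat) :
    set2 r a b (f a b) = setCellsF f r [(a, b)] := by
  simp [setCellsF]

lemma setCellsF_if0 (r : List (List Int)) (c : Prop) [Decidable c] (a b : Nat) :
    (if c then set2 r a b 0 else r) = setCellsF zf r (if c then [(a, b)] else []) :=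
  setCellsF_if zf r c a b

lemma A_eq (grid : List (List Int)) :
    growingColor0 grid = setCellsF zf (gridCopyPort grid) (PA grid) := by
  have h1 : ∀ (r : List (List Int)) (i : Nat),
      (List.range (grid.headD []).length).foldl
        (fun res j => if getCell grid i j = 0 then set2 res (i - 1) j 0 else res) r
      = setCellsF zf r ((List.range (grid.headD []).length).flatMap
          (fun j => if getCell grid i j = 0 then [(i - 1, j)] else [])) :=
    by intro r i; refine foldl_setCells (fun r' j => ?_) _ r
       exact setCellsF_if0 r' (getCell grid i j = 0) (i - 1) j
  have h2 : ∀ (r : List (List Int)) (k : Nat),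
      ((List.range ((grid.headD []).length - 1)).reverse).foldl
        (fun res l => if getCell grid k l = 0 then set2 res k (l + 1) 0 else res) r
      = setCellsF zf r (((List.range ((grid.headD []).length - 1)).reverse).flatMap
          (fun l => if getCell grid k l = 0 then [(k, l + 1)] else [])) :=
    by intro r k; refine foldl_setCells (fun r' l => ?_) _ r
       exact setCellsF_if0 r' (getCell grid k l = 0) k (l + 1)
  have h3 : ∀ (r : List (List Int)) (m : Nat),
      (List.range (grid.headD []).length).foldl
        (fun res n => if getCell grid m n = 0 then set2 res (m + 1) n 0 else res) r
      = setCellsF zf r ((List.range (grid.headD []).length).flatMap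
          (fun n => if getCell grid m n = 0 then [(m + 1, n)] else [])) :=
    by intro r m; refine foldl_setCells (fun r' n => ?_) _ r
       exact setCellsF_if0 r' (getCell grid m n = 0) (m + 1) n
  have h4 : ∀ (r : List (List Int)) (o : Nat),
      (List.range' 1 ((grid.headD []).length - 1)).foldl
        (fun res p => if getCell grid o p = 0 then set2 res o (p - 1) 0 else res) r
      = setCellsF zf r ((List.range' 1 ((grid.headD []).length - 1)).flatMap
          (fun p => if getCell grid o p = 0 then [(o, p - 1)] else [])) :=
    by intro r o; refine foldl_setCells (fun r' p => ?_) _ r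
       exact setCellsF_if0 r' (getCell grid o p = 0) o (p - 1)
  simp only [growingColor0, PA]
  rw [foldl_setCells h1, foldl_setCells h2, foldl_setCells h3, foldl_setCells h4,
      setCellsF_append, setCellsF_append, setCellsF_append]

lemma B_eq (grid : List (List Int)) :
    growingColor0_alt grid = setCellsF zf grid (PB grid) := by
  have hin : ∀ (i : Nat) (r : List (List Int)) (j : Nat),
      (if (grid.getD i []).getD j 0 = 0 then
        (let res := if 1 ≤ i then set2 r (i - 1) j 0 else r
         let res := if j + 1 < (grid.getD i []).length then set2 res i (j + 1) 0 else res
         let res := if i + 1 < grid.length then set2 res (i + 1) j 0 else res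
         if 1 ≤ j then set2 res i (j - 1) 0 else res)
       else r)
      = setCellsF zf r (if (grid.getD i []).getD j 0 = 0 then
          (if 1 ≤ i then [(i - 1, j)] else []) ++
          (if j + 1 < (grid.getD i []).length then [(i, j + 1)] else []) ++
          (if i + 1 < grid.length then [(i + 1, j)] else []) ++
          (if 1 ≤ j then [(i, j - 1)] else [])
        else []) := by
    intro i r j
    by_cases hz : (grid.getD i []).getD j 0 = 0
    · rw [if_pos hz, if_pos hz]
      simp only [setCellsF_append]
      rw [← setCellsF_if0, ← setCellsF_if0, ← setCellsF_if0, ← setCellsF_if0]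
    · rw [if_neg hz, if_neg hz]; rfl
  have hb : ∀ (r : List (List Int)) (i : Nat),
      (List.range (grid.getD i []).length).foldl
        (fun res j => if (grid.getD i []).getD j 0 = 0 then
          (let res2 := if 1 ≤ i then set2 res (i - 1) j 0 else res
           let res3 := if j + 1 < (grid.getD i []).length then set2 res2 i (j + 1) 0 else res2
           let res4 := if i + 1 < grid.length then set2 res3 (i + 1) j 0 else res3
           if 1 ≤ j then set2 res4 i (j - 1) 0 else res4)
         else res) r
      = setCellsF zf r ((List.range (grid.getD i []).length).flatMap
          (fun j => if (grid.getD i []).getD j 0 = 0 then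
            (if 1 ≤ i then [(i - 1, j)] else []) ++
            (if j + 1 < (grid.getD i []).length then [(i, j + 1)] else []) ++
            (if i + 1 < grid.length then [(i + 1, j)] else []) ++
            (if 1 ≤ j then [(i, j - 1)] else [])
          else [])) :=
    by intro r i; refine foldl_setCells (fun r' j => ?_) _ r
       exact hin i r' j
  simp only [growingColor0_alt, PB]
  rw [foldl_setCells hb]

lemma copy_eq (grid : List (List Int)) :
    gridCopyPort grid = setCellsF (fun i j => getCell grid i j)
      (List.replicate grid.length (List.replicate (grid.headD []).length (0 : Int)))
      (PCopy grid) := by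
  have hb : ∀ (r : List (List Int)) (i : Nat),
      (List.range (grid.getD i []).length).foldl
        (fun res j => set2 res i j (getCell grid i j)) r
      = setCellsF (fun i j => getCell grid i j) r
          ((List.range (grid.getD i []).length).flatMap (fun j => [(i, j)])) :=
    by intro r i; refine foldl_setCells (fun r' j => ?_) _ r
       exact setCellsF_single (fun i j => getCell grid i j) r' i j
  simp only [gridCopyPort, PCopy]
  rw [foldl_setCells hb]

lemma shape_zeros {grid : List (List Int)} (hp : Pre_growingColor0 grid) :
    Shape (List.replicate grid.length (List.replicate (grid.headD []).length (0 : Int))) grid := by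
  refine ⟨by simp, fun i => ?_⟩
  by_cases hi : i < grid.length
  · rw [rowlen_of_pre hp hi, getD_in _ _ (by simpa using hi)]
    simp
  · rw [getD_out _ _ (by simpa using Nat.le_of_not_lt hi), getD_out _ _ (Nat.le_of_not_lt hi)]

lemma PCopy_inb (grid : List (List Int)) : ∀ p ∈ PCopy grid, InB grid p := by
  intro p hm
  simp only [PCopy, List.mem_flatMap, List.mem_range, List.mem_singleton] at hm
  obtain ⟨i, hi, j, hj, rfl⟩ := hm
  exact ⟨hi, hj⟩

lemma mem_PCopy (grid : List (List Int)) (a b : Nat) :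
    (a, b) ∈ PCopy grid ↔ a < grid.length ∧ b < (grid.getD a []).length := by
  simp only [PCopy, List.mem_flatMap, List.mem_range, List.mem_singleton, Prod.mk.injEq]
  constructor
  · rintro ⟨i, hi, j, hj, rfl, rfl⟩; exact ⟨hi, hj⟩
  · rintro ⟨ha, hb⟩; exact ⟨a, ha, b, hb, rfl, rfl⟩

lemma shape_copy {grid : List (List Int)} (hp : Pre_growingColor0 grid) :
    Shape (gridCopyPort grid) grid := by
  rw [copy_eq]
  exact (setCellsF_spec _ (shape_zeros hp) (PCopy_inb grid)).1

lemma getCell_copy {grid : List (List Int)} (hp : Pre_growingColor0 grid) (a b : Nat) :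
    getCell (gridCopyPort grid) a b = getCell grid a b := by
  rw [copy_eq]
  have S := setCellsF_spec (fun i j => getCell grid i j) (shape_zeros hp) (PCopy_inb grid)
  rw [S.2]
  by_cases hm : (a, b) ∈ PCopy grid
  · rw [if_pos hm]
  · rw [if_neg hm]
    have hob := (not_iff_not.mpr (mem_PCopy grid a b)).mp hm
    have hz : getCell (List.replicate grid.length
        (List.replicate (grid.headD []).length (0 : Int))) a b = 0 := by
      unfold getCell
      by_cases ha : a < grid.length
      · rw [show (List.replicate grid.length
            (List.replicate (grid.headD []).length (0 : Int))).getD a []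
            = List.replicate (grid.headD []).length (0 : Int) from by
          rw [getD_in _ a (by simpa using ha)]; simp]
        by_cases hb : b < (grid.headD []).length
        · rw [getD_in _ b (by simpa using hb)]; simp
        · rw [getD_out _ b (by simpa using Nat.le_of_not_lt hb)]
      · rw [show (List.replicate grid.length
            (List.replicate (grid.headD []).length (0 : Int))).getD a [] = [] from
          getD_out _ a (by simpa using Nat.le_of_not_lt ha) []]
        rfl
    have hg : getCell grid a b = 0 := by
      unfold getCell
      by_cases ha : a < grid.length
      · have hb : (grid.getD a []).length ≤ b := by
          rcases Decidable.not_and_iff_not_or_not.mp hob with h | h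
          · exact absurd ha h
          · exact Nat.le_of_not_lt h
        rw [getD_out _ _ hb]
      · rw [getD_out _ _ (Nat.le_of_not_lt ha)]; rfl
    rw [hz, hg]

lemma PA_inb {grid : List (List Int)} (hp : Pre_growingColor0 grid) :
    ∀ p ∈ PA grid, InB grid p := by
  intro p hm
  simp only [PA, List.mem_append, List.mem_flatMap, List.mem_reverse, List.mem_range,
    List.mem_range'_1, mem_ite_singleton] at hm
  rcases hm with (((⟨i, ⟨hi1, hi2⟩, j, hj, hz, rfl⟩ | ⟨k, hk, l, hl, hz, rfl⟩) |
    ⟨m, hm2, n, hn, hz, rfl⟩) | ⟨o, ho, q, ⟨hq1, hq2⟩, hz, rfl⟩)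
  · exact ⟨by omega, by rw [rowlen_of_pre hp (by omega)]; omega⟩
  · exact ⟨by omega, by rw [rowlen_of_pre hp (by omega)]; omega⟩
  · exact ⟨by omega, by rw [rowlen_of_pre hp (by omega)]; omega⟩
  · exact ⟨by omega, by rw [rowlen_of_pre hp (by omega)]; omega⟩

lemma PB_inb {grid : List (List Int)} (hp : Pre_growingColor0 grid) :
    ∀ p ∈ PB grid, InB grid p := by
  intro p hm
  simp only [PB, List.mem_flatMap, List.mem_range, mem_ite_nil, List.mem_append,
    List.mem_singleton] at hm
  obtain ⟨i, hi, j, hj, hz, hcases⟩ := hm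
  have hw := rowlen_of_pre hp hi
  rcases hcases with ((⟨h1, rfl⟩ | ⟨h2, rfl⟩) | ⟨h3, rfl⟩) | ⟨h4, rfl⟩
  · exact ⟨by omega, by rw [rowlen_of_pre hp (by omega)]; omega⟩
  · exact ⟨by omega, by rw [rowlen_of_pre hp (by omega)]; omega⟩
  · exact ⟨by omega, by rw [rowlen_of_pre hp (by omega)]; omega⟩
  · exact ⟨by omega, by rw [rowlen_of_pre hp (by omega)]; omega⟩

lemma mem_PA {grid : List (List Int)} (_hp : Pre_growingColor0 grid) (a b : Nat) :
    (a, b) ∈ PA grid ↔ NbrZero grid a b := by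
  simp only [PA, NbrZero, List.mem_append, List.mem_flatMap, List.mem_reverse, List.mem_range,
    List.mem_range'_1, mem_ite_singleton, Prod.mk.injEq]
  constructor
  · rintro (((⟨i, ⟨hi1, hi2⟩, j, hj, hz, ha, hb⟩ | ⟨k, hk, l, hl, hz, ha, hb⟩) |
      ⟨m, hm2, n, hn, hz, ha, hb⟩) | ⟨o, ho, q, ⟨hq1, hq2⟩, hz, ha, hb⟩)
    · refine Or.inl ⟨by omega, by omega, ?_⟩
      convert hz using 2 <;> omega
    · refine Or.inr (Or.inl ⟨by omega, by omega, by omega, ?_⟩)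
      convert hz using 2 <;> omega
    · refine Or.inr (Or.inr (Or.inl ⟨by omega, by omega, by omega, ?_⟩))
      convert hz using 2 <;> omega
    · refine Or.inr (Or.inr (Or.inr ⟨by omega, by omega, ?_⟩))
      convert hz using 2 <;> omega
  · rintro (⟨h1, h2, hz⟩ | ⟨h1, h2, h3, hz⟩ | ⟨h1, h2, h3, hz⟩ | ⟨h1, h2, hz⟩)
    · exact Or.inl (Or.inl (Or.inl ⟨a + 1, ⟨by omega, by omega⟩, b, by omega, hz, by omega, rfl⟩))
    · exact Or.inl (Or.inl (Or.inr ⟨a, by omega, b - 1, by omega, hz, rfl, by omega⟩))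
    · exact Or.inl (Or.inr ⟨a - 1, by omega, b, by omega, hz, by omega, rfl⟩)
    · exact Or.inr ⟨a, by omega, b + 1, ⟨by omega, by omega⟩, hz, rfl, by omega⟩

lemma mem_PB {grid : List (List Int)} (hp : Pre_growingColor0 grid) (a b : Nat) :
    (a, b) ∈ PB grid ↔ NbrZero grid a b := by
  simp only [PB, NbrZero, getCell, List.mem_flatMap, List.mem_range, mem_ite_nil,
    List.mem_append, List.mem_singleton, Prod.mk.injEq]
  constructor
  · rintro ⟨i, hi, j, hj, hz, hcases⟩
    have hw := rowlen_of_pre hp hi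
    rcases hcases with ((⟨h1, ha, hb⟩ | ⟨h2, ha, hb⟩) | ⟨h3, ha, hb⟩) | ⟨h4, ha, hb⟩
    · refine Or.inl ⟨by omega, by omega, ?_⟩
      convert hz using 3 <;> omega
    · refine Or.inr (Or.inl ⟨by omega, by omega, by omega, ?_⟩)
      convert hz using 3 <;> omega
    · refine Or.inr (Or.inr (Or.inl ⟨by omega, by omega, by omega, ?_⟩))
      convert hz using 3 <;> omega
    · refine Or.inr (Or.inr (Or.inr ⟨by omega, by omega, ?_⟩))
      convert hz using 3 <;> omega
  · rintro (⟨h1, h2, hz⟩ | ⟨h1, h2, h3, hz⟩ | ⟨h1, h2, h3, hz⟩ | ⟨h1, h2, hz⟩)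
    · have hw := rowlen_of_pre hp (show a + 1 < grid.length by omega)
      exact ⟨a + 1, by omega, b, by omega, hz,
        Or.inl (Or.inl (Or.inl ⟨by omega, by omega, rfl⟩))⟩
    · have hw := rowlen_of_pre hp (show a < grid.length by omega)
      exact ⟨a, by omega, b - 1, by omega, hz,
        Or.inl (Or.inl (Or.inr ⟨by omega, rfl, by omega⟩))⟩
    · have hw := rowlen_of_pre hp (show a - 1 < grid.length by omega)
      exact ⟨a - 1, by omega, b, by omega, hz,
        Or.inl (Or.inr ⟨by omega, by omega, rfl⟩)⟩
    · have hw := rowlen_of_pre hp (show a < grid.length by omega)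
      exact ⟨a, by omega, b + 1, by omega, hz, Or.inr ⟨by omega, rfl, by omega⟩⟩

lemma grid_eq_of {g1 g2 grid : List (List Int)} (h1 : Shape g1 grid) (h2 : Shape g2 grid)
    (hg : ∀ a b, getCell g1 a b = getCell g2 a b) : g1 = g2 := by
  apply List.ext_getElem (h1.1.trans h2.1.symm)
  intro i hi1 hi2
  have e1 : g1.getD i [] = g1[i] := getD_in _ _ hi1 _
  have e2 : g2.getD i [] = g2[i] := getD_in _ _ hi2 _
  apply List.ext_getElem
  · have hl := (h1.2 i).trans (h2.2 i).symm
    rwa [e1, e2] at hl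
  · intro j hj1 hj2
    have hc := hg i j
    unfold getCell at hc
    rw [e1, e2, getD_in _ _ hj1, getD_in _ _ hj2] at hc
    exact hc

-- ===== VERDICT (by name: the statement is the Claim_ definition above) =====
theorem growingColor0_spec : Claim_equal_growingColor0 := by
  intro grid _ hp
  unfold Spec_growingColor0
  have SA := setCellsF_spec zf (shape_copy hp) (PA_inb hp)
  have SB := setCellsF_spec zf ⟨rfl, fun _ => rfl⟩ (PB_inb hp)
  rw [A_eq, B_eq]
  refine grid_eq_of SA.1 SB.1 (fun a b => ?_)
  rw [SA.2, SB.2, getCell_copy hp]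
  by_cases hc : (a, b) ∈ PA grid
  · rw [if_pos hc, if_pos ((mem_PB hp a b).mpr ((mem_PA hp a b).mp hc))]
  · rw [if_neg hc, if_neg (fun h => hc ((mem_PA hp a b).mpr ((mem_PB hp a b).mp h)))]
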